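-- pv_equiv track=rewrite | github.com/Izz-b/greenNovation | ai/agents/readiness/rules.py | select_top_risk_flags
-- ===== SOURCE A (Python) =====
-- def select_top_risk_flags(flags: list[str]) -> list[str]:
--     priority = [
--         "high_workload_pressure",
--         "declining_learning_trend",
--         "fatigue_pattern_detected",
--         "unstable_study_pattern",
--         "multiple_near_deadlines",
--         "overdue_work_present",
--         "high_project_risk",
--         "low_session_completion",
--         "late_night_study_pattern",
--         "long_sessions_without_breaks",
--         "high_academic_struggle",
--         "low_study_consistency",
--     ]
--
--     selected: list[str] = []
--
--     for item in priority:
--         if item in flags and item not in selected: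
--             selected.append(item)
--         if len(selected) == 3:
--             return selected
--
--     for item in flags:
--         if item not in selected:
--             selected.append(item)
--         if len(selected) == 3:
--             break
--
--     return selected
-- ===== SOURCE B (Python) =====
-- def select_top_risk_flags(flags: list[str]) -> list[str]:
--     priority = [
--         "high_workload_pressure",
--         "declining_learning_trend",
--         "fatigue_pattern_detected",
--         "unstable_study_pattern",
--         "multiple_near_deadlines",
--         "overdue_work_present",
--         "high_project_risk",
--         "low_session_completion",
--         "late_night_study_pattern",
--         "long_sessions_without_breaks",
--         "high_academic_struggle",
--         "low_study_consistency",
--     ]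
--     rank = {name: i for i, name in enumerate(priority)}
--     deduped = list(dict.fromkeys(flags))
--     ordered = sorted(deduped, key=lambda f: rank.get(f, len(priority)))
--     return ordered[:3]
-- ===== Notes on version B (the rewrite author's own statement) =====
-- stated objective: alternative
-- what changed: Replaces A's two early-exit scans (priority list against flags, then flags against selected) by dedup-by-first-occurrence plus one stable sort keyed by a priority-rank dict, taking the first three of the sorted list.
import Mathlib
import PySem

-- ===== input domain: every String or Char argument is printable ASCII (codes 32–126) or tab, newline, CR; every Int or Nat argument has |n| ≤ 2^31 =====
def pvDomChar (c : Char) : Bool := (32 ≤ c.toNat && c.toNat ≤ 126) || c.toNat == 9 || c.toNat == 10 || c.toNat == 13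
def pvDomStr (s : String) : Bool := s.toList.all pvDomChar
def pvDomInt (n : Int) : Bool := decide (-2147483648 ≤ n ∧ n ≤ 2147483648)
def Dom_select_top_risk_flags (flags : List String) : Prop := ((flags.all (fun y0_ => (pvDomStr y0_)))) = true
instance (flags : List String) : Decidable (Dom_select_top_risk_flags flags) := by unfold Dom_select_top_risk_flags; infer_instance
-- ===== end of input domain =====

-- B replaces A's two early-exit loops by: dedup the flags (first occurrences), stable-sort them by
-- priority rank (rank dict, non-priority flags rank len(priority)), return the first three (objective: alternative).

-- ===== PORT A =====
-- the module-level priority list both Python versions contain verbatim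
def pvPriority : List String :=
  [ "high_workload_pressure",
    "declining_learning_trend",
    "fatigue_pattern_detected",
    "unstable_study_pattern",
    "multiple_near_deadlines",
    "overdue_work_present",
    "high_project_risk",
    "low_session_completion",
    "late_night_study_pattern",
    "long_sessions_without_breaks",
    "high_academic_struggle",
    "low_study_consistency" ]

-- first loop of A; Sum.inl = the early 'return selected', Sum.inr = fell through with this 'selected'
def pvLoop1 (flags : List String) (sel : List String) : List String → Sum (List String) (List String)
  | [] => Sum.inr sel
  | item :: rest =>
      let sel' := if item ∈ flags ∧ item ∉ sel then sel ++ [item] else sel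
      if sel'.length = 3 then Sum.inl sel' else pvLoop1 flags sel' rest

-- second loop of A (over flags, with the 'break' at length 3)
def pvLoop2 (sel : List String) : List String → List String
  | [] => sel
  | item :: rest =>
      let sel' := if item ∉ sel then sel ++ [item] else sel
      if sel'.length = 3 then sel' else pvLoop2 sel' rest

def select_top_risk_flags (flags : List String) : List String :=
  match pvLoop1 flags [] pvPriority with
  | Sum.inl sel => sel
  | Sum.inr sel => pvLoop2 sel flags

-- ===== PORT B =====
-- rank = {name: i for i, name in enumerate(priority)}
def pvRank : PySem.Dict String Int :=
  (PySem.List.enumerate pvPriority 0).foldl (fun d p => PySem.Dict.insert d p.2 p.1) PySem.Dict.empty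

-- the sort key: rank.get(f, len(priority))
def pvKey (f : String) : Int := PySem.Dict.getD pvRank f (PySem.List.len pvPriority)

def select_top_risk_flags_alt (flags : List String) : List String :=
  let deduped := PySem.List.dedup flags          -- list(dict.fromkeys(flags))
  let ordered := PySem.List.sorted deduped pvKey -- stable sort by key
  PySem.List.slice ordered none (some 3)         -- ordered[:3]

-- ===== PRECONDITION & SPEC =====
def Spec_select_top_risk_flags (flags : List String) (out : List String) : Prop := out = select_top_risk_flags_alt flags
instance (flags : List String) (out : List String) : Decidable (Spec_select_top_risk_flags flags out) := by unfold Spec_select_top_risk_flags; infer_instance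

-- ===== CLAIM (what is proved, stated in full; the proofs are below) =====
def Claim_equal_select_top_risk_flags : Prop := ∀ (flags : List String), Dom_select_top_risk_flags flags → Spec_select_top_risk_flags flags (select_top_risk_flags flags)

-- ===== LEMMAS AND PROOFS =====

-- first occurrences of a list, kept in order (proved equal to PySem.List.dedup below)
def pvFirstOccs : List String → List String
  | [] => []
  | x :: r => x :: (pvFirstOccs r).filter (fun y => y ≠ x)

-- the priority flags present, in priority order
def pvP (flags : List String) : List String := pvPriority.filter (fun x => decide (x ∈ flags))
-- the non-priority flags, first occurrences in original order
def pvDN (flags : List String) : List String := (pvFirstOccs flags).filter (fun x => decide (x ∉ pvPriority))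

lemma pvFirstOccs_sublist (fl : List String) : (pvFirstOccs fl).Sublist fl := by
  induction fl with
  | nil => simp [pvFirstOccs]
  | cons x r ih =>
      simp only [pvFirstOccs]
      exact List.Sublist.cons₂ x (List.Sublist.trans List.filter_sublist ih)

lemma pvFirstOccs_mem {fl : List String} {y : String} (h : y ∈ pvFirstOccs fl) : y ∈ fl :=
  (pvFirstOccs_sublist fl).mem h

lemma pvFirstOccs_nodup (fl : List String) : (pvFirstOccs fl).Nodup := by
  induction fl with
  | nil => simp [pvFirstOccs]
  | cons x r ih =>
      simp only [pvFirstOccs, List.nodup_cons]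
      refine ⟨fun hx => ?_, ih.filter _⟩
      · have := List.of_mem_filter hx
        simp at this
  -- membership of x in the filtered tail is contradictory since the filter removes x

lemma pvMem_firstOccs {fl : List String} {a : String} (h : a ∈ fl) : a ∈ pvFirstOccs fl := by
  induction fl with
  | nil => simp at h
  | cons x r ihf =>
      simp only [pvFirstOccs, List.mem_cons, List.mem_filter]
      rcases List.mem_cons.mp h with h' | h'
      · exact Or.inl h'
      · by_cases hax : a = x
        · exact Or.inl hax
        · exact Or.inr ⟨ihf h', by simp [hax]⟩

lemma pvFoldl_add_eq (r s : List String) :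
    List.foldl PySem.Set.add s r = s ++ (pvFirstOccs r).filter (fun y => decide (y ∉ s)) := by
  induction r generalizing s with
  | nil => simp [pvFirstOccs]
  | cons x r ih =>
      simp only [List.foldl_cons, pvFirstOccs, PySem.Set.add, PySem.Set.contains]
      by_cases hx : x ∈ s
      · rw [if_pos (by simpa using hx), ih]
        have hxf : (decide (x ∉ s)) = false := by simp [hx]
        rw [List.filter_cons, hxf]
        simp only [Bool.false_eq_true, if_false]
        congr 1
        rw [List.filter_filter]
        apply List.filter_congr
        intro y _
        by_cases hy : y = x
        · subst hy; simp [hx]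
        · simp [hy]
      · rw [if_neg (by simpa using hx), ih]
        have hfs : List.filter (fun y => decide (y ∉ s ++ [x])) (pvFirstOccs r)
            = List.filter (fun y => decide (y ∉ s)) (List.filter (fun y => decide (y ≠ x)) (pvFirstOccs r)) := by
          rw [List.filter_filter]
          apply List.filter_congr
          intro y _
          by_cases hy : y = x <;> by_cases hys : y ∈ s <;> simp [hy, hys]
        rw [hfs]
        simp [hx]

lemma pvDedup_eq (fl : List String) : PySem.List.dedup fl = pvFirstOccs fl := by
  rw [PySem.List.dedup_eq_ofList]
  show List.foldl PySem.Set.add [] fl = _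
  rw [pvFoldl_add_eq]
  simp

-- key facts
lemma pvKey_le (x : String) : pvKey x ≤ 12 := by
  by_cases hx : x ∈ pvPriority
  · fin_cases hx <;> decide
  · simp only [pvPriority, List.mem_cons, not_or] at hx
    obtain ⟨h1,h2,h3,h4,h5,h6,h7,h8,h9,h10,h11,h12,_⟩ := hx
    simp [pvKey, pvRank, pvPriority, PySem.List.enumerate, PySem.Dict.getD, PySem.Dict.get?,
      PySem.Dict.insert, PySem.Dict.empty, Ne.symm h1, Ne.symm h2, Ne.symm h3, Ne.symm h4,
      Ne.symm h5, Ne.symm h6, Ne.symm h7, Ne.symm h8, Ne.symm h9, Ne.symm h10, Ne.symm h11,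
      Ne.symm h12]

lemma pvKey_of_not_mem {x : String} (hx : x ∉ pvPriority) : pvKey x = 12 := by
  simp only [pvPriority, List.mem_cons, not_or] at hx
  obtain ⟨h1,h2,h3,h4,h5,h6,h7,h8,h9,h10,h11,h12,_⟩ := hx
  simp [pvKey, pvRank, pvPriority, PySem.List.enumerate, PySem.Dict.getD, PySem.Dict.get?,
    PySem.Dict.insert, PySem.Dict.empty, Ne.symm h1, Ne.symm h2, Ne.symm h3, Ne.symm h4,
    Ne.symm h5, Ne.symm h6, Ne.symm h7, Ne.symm h8, Ne.symm h9, Ne.symm h10, Ne.symm h11,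
    Ne.symm h12]

lemma pvKey_of_mem {x : String} (hx : x ∈ pvPriority) : pvKey x < 12 := by
  fin_cases hx <;> decide

lemma pvKey_lt_iff (x : String) : pvKey x < 12 ↔ x ∈ pvPriority := by
  constructor
  · intro h
    by_contra hx
    rw [pvKey_of_not_mem hx] at h
    omega
  · exact pvKey_of_mem

lemma pvPriority_pairwise : pvPriority.Pairwise (fun a b => pvKey a < pvKey b) := by decide

lemma pvPriority_nodup : pvPriority.Nodup := by decide

-- inserting an element strictly below every element of `highs` commutes with the append
lemma pvInsertBy_append_high (before : String → String → Bool) (x : String)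
    (low highs : List String) (h : ∀ y ∈ highs, before x y = true) :
    PySem.List.insertBy before x (low ++ highs) = PySem.List.insertBy before x low ++ highs := by
  induction low with
  | nil =>
      cases highs with
      | nil => simp
      | cons a t =>
          simp only [List.nil_append, PySem.List.insertBy]
          rw [if_pos (h a (by simp))]
          rfl
  | cons a l ih =>
      simp only [List.cons_append, PySem.List.insertBy]
      by_cases hb : before x a = true
      · rw [if_pos hb, if_pos hb]; simp
      · rw [if_neg hb, if_neg hb]; simp [ih]

-- stability: a sort whose keys are ≤ 12 splits into the sorted <12 part followed by the =12 part in order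
lemma pvSorted_split (xs : List String) (h : ∀ x ∈ xs, pvKey x ≤ 12) :
    PySem.List.sorted xs pvKey =
      PySem.List.sorted (xs.filter (fun x => decide (pvKey x < 12))) pvKey
        ++ xs.filter (fun x => decide (pvKey x = 12)) := by
  induction xs using List.reverseRecOn with
  | nil => simp
  | append_singleton xs x ih =>
      have hxs : ∀ y ∈ xs, pvKey y ≤ 12 := fun y hy => h y (by simp [hy])
      have hx : pvKey x ≤ 12 := h x (by simp)
      rw [PySem.List.sorted_eq_foldl_insertBy, List.foldl_append, List.foldl_cons, List.foldl_nil,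
        ← PySem.List.sorted_eq_foldl_insertBy, ih hxs]
      by_cases hlt : pvKey x < 12
      · have hhigh : ∀ y ∈ xs.filter (fun x => decide (pvKey x = 12)),
            (fun a b => decide (pvKey a < pvKey b)) x y = true := by
          intro y hy
          have := List.of_mem_filter hy
          simp only [decide_eq_true_eq] at this
          simp [this, hlt]
        rw [pvInsertBy_append_high _ _ _ _ hhigh]
        have hne : ¬ pvKey x = 12 := by omega
        rw [List.filter_append, List.filter_append]
        simp only [List.filter_cons, List.filter_nil, decide_eq_true_eq, hlt, hne, if_pos, if_neg,
          not_false_iff]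
        rw [PySem.List.sorted_eq_foldl_insertBy (xs.filter _ ++ [x]), List.foldl_append,
          List.foldl_cons, List.foldl_nil, ← PySem.List.sorted_eq_foldl_insertBy]
        simp
      · have heq : pvKey x = 12 := by omega
        have hlow : ∀ y ∈ PySem.List.sorted (xs.filter (fun x => decide (pvKey x < 12))) pvKey
              ++ xs.filter (fun x => decide (pvKey x = 12)),
            (fun a b => decide (pvKey a < pvKey b)) x y = false := by
          intro y hy
          have hky : pvKey y ≤ 12 := by
            rcases List.mem_append.mp hy with hy | hy
            · exact hxs y (List.mem_filter.mp ((PySem.List.mem_sorted _ _ _ _).mp hy)).1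
            · exact hxs y (List.mem_filter.mp hy).1
          simp only [decide_eq_false_iff_not, not_lt, heq]
          omega
        rw [PySem.List.insertBy_of_forall_not_before _ _ _ hlow]
        rw [List.filter_append, List.filter_append]
        simp [heq]

-- the two loops of A, characterised
lemma pvLoop1_spec (flags : List String) (pr sel : List String) (hnd : pr.Nodup)
    (hdisj : ∀ x ∈ pr, x ∉ sel) (hlen : sel.length < 3) :
    pvLoop1 flags sel pr =
      if 3 ≤ sel.length + (pr.filter (fun x => decide (x ∈ flags))).length
      then Sum.inl ((sel ++ pr.filter (fun x => decide (x ∈ flags))).take 3)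
      else Sum.inr (sel ++ pr.filter (fun x => decide (x ∈ flags))) := by
  induction pr generalizing sel with
  | nil =>
      simp only [pvLoop1, List.filter_nil, List.length_nil, List.append_nil]
      rw [if_neg (by omega)]
  | cons item rest ih =>
      have hnotsel : item ∉ sel := hdisj item (by simp)
      rw [pvLoop1]
      by_cases hmem : item ∈ flags
      · have hc : (if item ∈ flags ∧ item ∉ sel then sel ++ [item] else sel) = sel ++ [item] :=
          if_pos ⟨hmem, hnotsel⟩
        rw [hc]
        simp only [List.filter_cons, hmem, decide_true, if_pos]
        by_cases h3 : (sel ++ [item]).length = 3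
        · rw [if_pos h3, if_pos (by simp at h3 ⊢; omega)]
          have hsel2 : sel.length = 2 := by simp at h3; omega
          congr 1
          rw [show sel ++ item :: List.filter (fun x => decide (x ∈ flags)) rest
                = (sel ++ [item]) ++ List.filter (fun x => decide (x ∈ flags)) rest by simp,
            List.take_append]
          rw [List.take_of_length_le (by omega)]
          simp [h3]
        · rw [if_neg h3]
          have hlen' : (sel ++ [item]).length < 3 := by simp at h3 ⊢; omega
          rw [ih (sel ++ [item]) hnd.of_cons
            (fun x hx => by
              simp only [List.mem_append, List.mem_singleton, not_or]
              exact ⟨hdisj x (by simp [hx]), fun hxi => (List.nodup_cons.mp hnd).1 (hxi ▸ hx)⟩)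
            hlen']
          have harr : sel ++ [item] ++ List.filter (fun x => decide (x ∈ flags)) rest
              = sel ++ item :: List.filter (fun x => decide (x ∈ flags)) rest := by simp
          rw [harr]
          have hlena : (sel ++ [item]).length + (List.filter (fun x => decide (x ∈ flags)) rest).length
              = sel.length + (item :: List.filter (fun x => decide (x ∈ flags)) rest).length := by
            simp; omega
          rw [hlena]
      · have hc : (if item ∈ flags ∧ item ∉ sel then sel ++ [item] else sel) = sel := by
          rw [if_neg]; tauto
        rw [hc, if_neg (by omega)]
        have hf : (decide (item ∈ flags)) = false := by simp [hmem]
        rw [List.filter_cons, hf]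
        simp only [Bool.false_eq_true, if_false]
        exact ih sel hnd.of_cons (fun x hx => hdisj x (by simp [hx])) hlen

lemma pvLoop2_spec (fl : List String) : ∀ sel : List String, sel.length < 3 →
    pvLoop2 sel fl = (sel ++ (pvFirstOccs fl).filter (fun y => decide (y ∉ sel))).take 3 := by
  induction fl with
  | nil =>
      intro sel hlen
      simp only [pvLoop2, pvFirstOccs, List.filter_nil, List.append_nil]
      rw [List.take_of_length_le (by omega)]
  | cons x rest ih =>
      intro sel hlen
      rw [pvLoop2]
      by_cases hx : x ∈ sel
      · have hc : (if x ∉ sel then sel ++ [x] else sel) = sel := by rw [if_neg]; tauto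
        rw [hc, if_neg (by omega), ih sel hlen]
        simp only [pvFirstOccs]
        have hxf : (decide (x ∉ sel)) = false := by simp [hx]
        rw [List.filter_cons, hxf]
        simp only [Bool.false_eq_true, if_false]
        congr 2
        rw [List.filter_filter]
        apply List.filter_congr
        intro y _
        by_cases hy : y = x
        · subst hy; simp [hx]
        · simp [hy]
      · have hc : (if x ∉ sel then sel ++ [x] else sel) = sel ++ [x] := if_pos hx
        rw [hc]
        simp only [pvFirstOccs, List.filter_cons, hx, not_false_iff, decide_true, if_pos]
        by_cases h3 : (sel ++ [x]).length = 3
        · rw [if_pos h3]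
          rw [show sel ++ x :: List.filter (fun y => decide (y ∉ sel))
                  (List.filter (fun y => decide (y ≠ x)) (pvFirstOccs rest))
                = (sel ++ [x]) ++ List.filter (fun y => decide (y ∉ sel))
                  (List.filter (fun y => decide (y ≠ x)) (pvFirstOccs rest)) by simp,
            List.take_append]
          rw [List.take_of_length_le (by omega)]
          simp [h3]
        · rw [if_neg h3]
          have hlen' : (sel ++ [x]).length < 3 := by simp at h3 ⊢; omega
          rw [ih (sel ++ [x]) hlen']
          have hfs : List.filter (fun y => decide (y ∉ sel ++ [x])) (pvFirstOccs rest)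
              = List.filter (fun y => decide (y ∉ sel))
                  (List.filter (fun y => decide (y ≠ x)) (pvFirstOccs rest)) := by
            rw [List.filter_filter]
            apply List.filter_congr
            intro y _
            by_cases hy : y = x <;> by_cases hys : y ∈ sel <;> simp [hy, hys]
          rw [hfs]
          simp

-- A computes take 3 of (priority part ++ non-priority part)
lemma pvA_eq (flags : List String) :
    select_top_risk_flags flags = (pvP flags ++ pvDN flags).take 3 := by
  unfold select_top_risk_flags
  rw [pvLoop1_spec flags pvPriority [] pvPriority_nodup (by simp) (by simp)]
  by_cases h3 : 3 ≤ ([] : List String).length + (pvPriority.filter (fun x => decide (x ∈ flags))).length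
  · rw [if_pos h3]
    simp only [List.nil_append]
    rw [List.take_append]
    have h0 : 3 - (pvP flags).length = 0 := by
      simp only [List.length_nil, pvP] at h3 ⊢
      omega
    rw [h0, List.take_zero, List.append_nil]
    rfl
  · rw [if_neg h3]
    simp only [List.nil_append, List.length_nil] at h3 ⊢
    rw [pvLoop2_spec flags _ (by simp at h3 ⊢; omega)]
    congr 2
    unfold pvDN
    apply List.filter_congr
    intro y hy
    have hyfl : y ∈ flags := pvFirstOccs_mem hy
    by_cases hyp : y ∈ pvPriority
    · simp [List.mem_filter, hyp, hyfl]
    · simp [List.mem_filter, hyp]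

-- B computes the same list
lemma pvB_eq (flags : List String) :
    select_top_risk_flags_alt flags = (pvP flags ++ pvDN flags).take 3 := by
  have h1 : select_top_risk_flags_alt flags
      = List.take 3 (PySem.List.sorted (pvFirstOccs flags) pvKey) := by
    show PySem.List.slice (PySem.List.sorted (PySem.List.dedup flags) pvKey) none (some 3) = _
    rw [PySem.List.slice_to _ (by omega), pvDedup_eq]
    simp
  rw [h1, pvSorted_split _ (fun x _ => pvKey_le x)]
  refine congrArg (List.take 3) ?_
  congr 1
  · -- sorted priority part = priority order
    apply PySem.List.sorted_eq_of_perm_of_pairwise_lt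
    · unfold pvP
      rw [List.perm_ext_iff_of_nodup (pvPriority_nodup.filter _) ((pvFirstOccs_nodup flags).filter _)]
      intro a
      simp only [List.mem_filter, decide_eq_true_eq]
      constructor
      · rintro ⟨hap, haf⟩
        exact ⟨pvMem_firstOccs haf, by simpa [pvKey_lt_iff] using hap⟩
      · rintro ⟨haf, hak⟩
        exact ⟨(pvKey_lt_iff a).mp hak, pvFirstOccs_mem haf⟩
    · exact pvPriority_pairwise.filter _
  · -- non-priority part: keys = 12 exactly off the priority list
    unfold pvDN
    apply List.filter_congr
    intro y _
    by_cases hy : y ∈ pvPriority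
    · have := pvKey_of_mem hy
      simp [hy]; omega
    · have := pvKey_of_not_mem hy
      simp [hy, this]

-- ===== VERDICT (by name: the statement is the Claim_ definition above) =====
theorem select_top_risk_flags_spec : Claim_equal_select_top_risk_flags := by
  intro flags _
  show select_top_risk_flags flags = select_top_risk_flags_alt flags
  rw [pvA_eq, pvB_eq]
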